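-- pv_equiv track=rewrite | github.com/www222fff/openclaw-social-skills | tiktok-video-make/scripts/subtitle_utils.py | distribute_evenly
-- ===== SOURCE A (Python) =====
-- def distribute_evenly(total: int, count: int) -> list[int]:
--     if count <= 0:
--         return []
--     base = max(1, total // count)
--     values = [base] * count
--     current_total = base * count
--     if current_total < total:
--         for i in range(total - current_total):
--             values[i % count] += 1
--     elif current_total > total:
--         overflow = current_total - total
--         i = count - 1
--         while overflow > 0 and i >= 0:
--             reducible = min(overflow, max(0, values[i] - 1))
--             values[i] -= reducible
--             overflow -= reducible
--             i -= 1
--     return values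
-- ===== SOURCE B (Python) =====
-- def distribute_evenly(total: int, count: int) -> list[int]:
--     if count <= 0:
--         return []
--     if total < count:
--         # A's reduction pass can never take a bucket below 1, so every bucket stays 1.
--         return [1] * count
--     q, r = divmod(total, count)
--     return [q + 1] * r + [q] * (count - r)
-- ===== Notes on version B (the rewrite author's own statement) =====
-- stated objective: simpler
-- what changed: Replaces A's mutate-in-place increment loop and backwards reduction while-loop with a closed-form list built from divmod: first r buckets get q+1, the rest q, and a direct [1]*count when total < count.
import Mathlib
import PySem

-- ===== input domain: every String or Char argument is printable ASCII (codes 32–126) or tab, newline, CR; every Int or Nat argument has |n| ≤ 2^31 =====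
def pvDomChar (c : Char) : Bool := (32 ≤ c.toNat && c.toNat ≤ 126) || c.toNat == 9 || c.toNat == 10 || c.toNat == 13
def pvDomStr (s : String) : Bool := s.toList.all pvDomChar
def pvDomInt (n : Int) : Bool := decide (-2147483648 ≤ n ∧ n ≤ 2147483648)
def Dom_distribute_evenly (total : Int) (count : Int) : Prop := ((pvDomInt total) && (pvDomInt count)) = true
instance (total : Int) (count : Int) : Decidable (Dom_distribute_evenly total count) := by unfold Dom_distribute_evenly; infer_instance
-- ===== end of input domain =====

-- B replaces A's in-place increment loop and backwards reduction while-loop with a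
-- closed-form list built from divmod; same cost, simpler.

-- ===== PORT A =====
-- 'for i in range(n): values[i % count] += 1' (indices are in range, so pyGetD/pySetD are exact)
def distEvenIncLoop (count : Int) (values : List Int) (n : Int) : List Int :=
  (PySem.List.pyRange 0 n 1).foldl
    (fun vs i =>
      PySem.List.pySetD vs (PySem.Int.mod i count)
        (PySem.List.pyGetD vs (PySem.Int.mod i count) 0 + 1)) values

-- 'while overflow > 0 and i >= 0: …'; fuel = count.toNat bounds the iterations (i starts at count-1 and decreases)
def distEvenRedLoop : List Int → Int → Int → Nat → List Int
  | values, _, _, 0 => values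
  | values, overflow, i, fuel+1 =>
    if overflow > 0 ∧ 0 ≤ i then
      let reducible := min overflow (max 0 (PySem.List.pyGetD values i 0 - 1))
      distEvenRedLoop (PySem.List.pySetD values i (PySem.List.pyGetD values i 0 - reducible))
        (overflow - reducible) (i - 1) fuel
    else values

def distribute_evenly (total : Int) (count : Int) : List Int :=
  if count ≤ 0 then []
  else
    let base := max 1 (PySem.Int.floordiv total count)
    let values := List.replicate count.toNat base
    let current_total := base * count
    if current_total < total then
      distEvenIncLoop count values (total - current_total)
    else if current_total > total then
      distEvenRedLoop values (current_total - total) (count - 1) count.toNat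
    else values

-- ===== PORT B =====
def distribute_evenly_alt (total : Int) (count : Int) : List Int :=
  if count ≤ 0 then []
  else if total < count then List.replicate count.toNat 1
  else
    let q := PySem.Int.floordiv total count
    let r := PySem.Int.mod total count
    List.replicate r.toNat (q + 1) ++ List.replicate (count - r).toNat q

-- ===== PRECONDITION & SPEC =====
def Spec_distribute_evenly (total : Int) (count : Int) (out : List Int) : Prop := out = distribute_evenly_alt total count
instance (total : Int) (count : Int) (out : List Int) : Decidable (Spec_distribute_evenly total count out) := by unfold Spec_distribute_evenly; infer_instance

-- ===== CLAIM (what is proved, stated in full; the proofs are below) =====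
def Claim_equal_distribute_evenly : Prop := ∀ (total : Int) (count : Int), Dom_distribute_evenly total count → Spec_distribute_evenly total count (distribute_evenly total count)

-- ===== LEMMAS AND PROOFS =====

-- setting an in-range position of a constant list to the same constant changes nothing
theorem set_repl (n m : Nat) (a : Int) : (List.replicate n a).set m a = List.replicate n a := by
  apply List.ext_getElem (by simp)
  intro k h1 h2
  simp

-- inserting at the boundary between the two halves of an append
theorem set_append_len (xs t : List Int) (y v : Int) (k : Nat) (hk : k = xs.length) :
    (xs ++ y :: t).set k v = xs ++ v :: t := by
  subst hk
  induction xs with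
  | nil => rfl
  | cons a xs ih => simpa [List.set] using ih

-- the reduction loop never changes an all-ones list (each bucket is already at the floor of 1)
theorem redLoop_ones (fuel : Nat) : ∀ (n : Nat) (overflow i : Int),
    distEvenRedLoop (List.replicate n 1) overflow i fuel = List.replicate n 1 := by
  induction fuel with
  | zero => intro n overflow i; rfl
  | succ fuel ih =>
    intro n overflow i
    rw [distEvenRedLoop]
    split
    · rename_i h
      obtain ⟨hov, hi⟩ := h
      have hcast : i = ((i.toNat : Nat) : Int) := (Int.toNat_of_nonneg hi).symm
      by_cases hk : i.toNat < n
      · have hv : (List.replicate n (1:Int)).getD i.toNat 0 = 1 := by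
          simp [List.getD_eq_getElem?_getD, hk]
        rw [hcast]
        simp only [PySem.List.pyGetD_natCast, PySem.List.pySetD_natCast, hv]
        norm_num [min_eq_right hov.le, set_repl]
        exact ih n _ _
      · have hv : (List.replicate n (1:Int)).getD i.toNat 0 = 0 := by
          simp [List.getD_eq_getElem?_getD, hk]
        rw [hcast]
        simp only [PySem.List.pyGetD_natCast, PySem.List.pySetD_natCast, hv]
        have hmin : min overflow (max 0 ((0:Int) - 1)) = 0 := by omega
        simp only [hmin, sub_zero]
        rw [List.set_eq_of_length_le (by simpa using Nat.le_of_not_lt hk)]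
        exact ih n _ _
    · rfl

-- the increment loop on a constant list bumps the first m entries by one
theorem incLoop_repl (count : Int) (b : Int) (hc : 0 < count) :
    ∀ (m : Nat), (m : Int) ≤ count →
    distEvenIncLoop count (List.replicate count.toNat b) (m : Int)
      = List.replicate m (b + 1) ++ List.replicate (count.toNat - m) b := by
  intro m
  induction m with
  | zero =>
    intro _
    simp [distEvenIncLoop, PySem.List.pyRange_one_eq_nil]
  | succ m ih =>
    intro hm
    have hm' : (m : Int) ≤ count := by push_cast at hm ⊢; omega
    have hmc : (m : Int) < count := by push_cast at hm; omega
    have hsplit : PySem.List.pyRange 0 ((m : Int) + 1) 1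
        = PySem.List.pyRange 0 (m : Int) 1 ++ [(m : Int)] :=
      PySem.List.pyRange_one_succ_right (by positivity)
    have hmod : PySem.Int.mod (m : Int) count = (m : Int) := by
      rw [PySem.Int.mod_eq_emod_of_pos hc]
      exact Int.emod_eq_of_lt (by positivity) hmc
    have hbody := ih hm'
    rw [distEvenIncLoop] at hbody ⊢
    push_cast
    rw [hsplit, List.foldl_append]
    rw [hbody]
    simp only [List.foldl_cons, List.foldl_nil, hmod,
      PySem.List.pyGetD_natCast, PySem.List.pySetD_natCast]
    have hlen : m < count.toNat := by omega
    have hrest : count.toNat - m = (count.toNat - m - 1) + 1 := by omega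
    have hgd : (List.replicate m (b+1) ++ List.replicate (count.toNat - m) b).getD m 0 = b := by
      rw [hrest, List.replicate_succ]
      simp [List.getD_eq_getElem?_getD]
    rw [hgd, hrest, List.replicate_succ]
    rw [set_append_len _ _ _ _ m (by simp)]
    rw [List.replicate_succ' ]
    simp [List.append_assoc]
    omega

-- ===== VERDICT (by name: the statement is the Claim_ definition above) =====
theorem distribute_evenly_spec : Claim_equal_distribute_evenly := by
  intro total count _dom
  unfold Spec_distribute_evenly distribute_evenly distribute_evenly_alt
  by_cases hc : count ≤ 0
  · simp [hc]
  · have hc' : 0 < count := by omega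
    have hq := Int.ediv_add_emod total count
    have hr0 : 0 ≤ total % count := Int.emod_nonneg total (by omega)
    have hrc : total % count < count := Int.emod_lt_of_pos total hc'
    simp only [if_neg hc, PySem.Int.floordiv_eq_ediv_of_pos hc',
      PySem.Int.mod_eq_emod_of_pos hc']
    by_cases hlt : total < count
    · have hqle : total / count ≤ 0 := by
        by_contra h
        push_neg at h
        nlinarith
      rw [max_eq_left (by omega), if_pos hlt]
      have h1 : ¬ (1 * count < total) := by omega
      have h2 : 1 * count > total := by omega
      rw [if_neg h1, if_pos h2]
      exact redLoop_ones _ _ _ _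
    · have hge : count ≤ total := by omega
      have hq1 : 1 ≤ total / count := by
        by_contra h
        push_neg at h
        nlinarith
      rw [max_eq_right hq1, if_neg hlt]
      have hct : total / count * count = total - total % count := by
        rw [mul_comm]; omega
      by_cases hr : total % count = 0
      · have h1 : ¬ (total / count * count < total) := by omega
        have h2 : ¬ (total / count * count > total) := by omega
        rw [if_neg h1, if_neg h2, hr]
        simp
      · have h1 : total / count * count < total := by omega
        rw [if_pos h1]
        have harg : total - total / count * count = total % count := by omega
        rw [harg]
        have hcast : total % count = (((total % count).toNat : Nat) : Int) :=
          (Int.toNat_of_nonneg hr0).symm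
        rw [hcast, incLoop_repl count _ hc' _ (by omega)]
        have e1 : ((((total % count).toNat : Int)).toNat) = (total % count).toNat := by omega
        have e2 : (count - (((total % count).toNat : Int))).toNat
            = count.toNat - (total % count).toNat := by omega
        rw [e1, e2]
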